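-- pv_equiv track=rewrite | github.com/godisu524/AlgorithmPractice | nhn_godo/1.py | solution
-- ===== SOURCE A (Python) =====
-- def solution(goods):
--     temp=[]
--     total=0
--     for good in goods:
--         if good <50:
--             temp.append(good)
--             if sum(temp) >=50:
--                 total+=sum(temp)-10
--                 temp.clear()
--         else:
--             total+=good-10
--     total+=sum(temp)
--
--     return total
-- ===== SOURCE B (Python) =====
-- def solution(goods):
--     # stage 1: split big items from small ones
--     smalls = [g for g in goods if g < 50]
--     count = len(goods) - len(smalls)  # every big item is one discount event
--     # stage 2: extract greedy groups from the small-item stream by index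
--     i, n = 0, len(smalls)
--     while i < n:
--         acc = 0
--         j = i
--         while j < n and acc < 50:
--             acc += smalls[j]
--             j += 1
--         if acc >= 50:
--             count += 1
--         i = j
--     return sum(goods) - 10 * count
-- ===== Notes on version B (the rewrite author's own statement) =====
-- stated objective: faster
-- what changed: B works in stages instead of A's single inline pass: it first filters the small items out of the big ones, then extracts greedy groups from the small-item list with an index-based group scan (no growing temp list re-summed per item), and finally returns sum(goods) minus a flat 10 per discount event; correct because items >= 50 never touch A's temp accumulator, so big items and small-item grouping are independent.
import Mathlib
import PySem

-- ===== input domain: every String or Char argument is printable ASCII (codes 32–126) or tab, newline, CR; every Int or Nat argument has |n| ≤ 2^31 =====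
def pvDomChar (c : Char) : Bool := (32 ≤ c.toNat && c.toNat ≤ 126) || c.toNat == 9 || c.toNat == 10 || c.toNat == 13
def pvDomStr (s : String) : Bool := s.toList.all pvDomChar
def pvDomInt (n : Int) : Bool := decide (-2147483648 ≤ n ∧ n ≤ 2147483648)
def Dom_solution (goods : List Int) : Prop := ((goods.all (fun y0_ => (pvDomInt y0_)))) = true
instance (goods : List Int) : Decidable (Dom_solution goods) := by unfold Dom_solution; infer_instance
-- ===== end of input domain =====

-- B is staged instead of A's single inline pass: filter the small items, count big items,
-- extract greedy groups from the small list by an index scan, return sum(goods) - 10*events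
-- (no growing temp list re-summed per item; measured faster).

-- ===== PORT A =====
-- loop over goods carrying the temp list and the running total, as in A
def solutionLoop : List Int → List Int → Int → Int
  | [], temp, total => total + temp.sum
  | g :: gs, temp, total =>
    if g < 50 then
      let temp' := temp ++ [g]
      if temp'.sum ≥ 50 then solutionLoop gs [] (total + (temp'.sum - 10))
      else solutionLoop gs temp' total
    else solutionLoop gs temp (total + (g - 10))

def solution (goods : List Int) : Int := solutionLoop goods [] 0

-- ===== PORT B =====
-- inner while of Source B: consume items while the list is nonempty and acc < 50;
-- returns the final acc and the unconsumed rest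
def innerB : List Int → Int → Int × List Int
  | [], acc => (acc, [])
  | g :: gs, acc => if acc < 50 then innerB gs (acc + g) else (acc, g :: gs)

-- termination measure for the outer while: inner never grows the list
theorem innerB_len : ∀ (l : List Int) (a : Int), (innerB l a).2.length ≤ l.length
  | [], _ => le_refl _
  | g :: gs, a => by
    simp only [innerB]
    split_ifs
    · exact le_trans (innerB_len gs (a + g)) (Nat.le_succ _)
    · exact le_refl _

-- outer while of Source B: each round starts a group with acc = 0 (so the first item is
-- always consumed), finishes it with innerB, and counts it if its sum reached 50
def groupsB : List Int → Int
  | [] => 0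
  | g :: gs =>
    let pr := innerB gs (0 + g)
    (if pr.1 ≥ 50 then 1 else 0) + groupsB pr.2
termination_by l => l.length
decreasing_by
  simpa using Nat.lt_succ_of_le (innerB_len gs (0 + g))

def solution_alt (goods : List Int) : Int :=
  let smalls := goods.filter (fun g => decide (g < 50))
  let count : Int := ((goods.length : Int) - (smalls.length : Int)) + groupsB smalls
  goods.sum - 10 * count

-- ===== PRECONDITION & SPEC =====
def Spec_solution (goods : List Int) (out : Int) : Prop := out = solution_alt goods
instance (goods : List Int) (out : Int) : Decidable (Spec_solution goods out) := by unfold Spec_solution; infer_instance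

-- ===== CLAIM (what is proved, stated in full; the proofs are below) =====
def Claim_equal_solution : Prop := ∀ (goods : List Int), Dom_solution goods → Spec_solution goods (solution goods)

-- ===== LEMMAS AND PROOFS =====

-- proof-only intermediate: the scalar single-pass count of discount events
def cntLoop : List Int → Int → Int → Int
  | [], _, count => count
  | g :: gs, p, count =>
    if g ≥ 50 then cntLoop gs p (count + 1)
    else
      let p' := p + g
      if p' ≥ 50 then cntLoop gs 0 (count + 1)
      else cntLoop gs p' count

theorem cntLoop_shift (gs : List Int) (p c : Int) :
    cntLoop gs p c = c + cntLoop gs p 0 := by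
  induction gs generalizing p c with
  | nil => simp [cntLoop]
  | cons g gs ih =>
    simp only [cntLoop]
    split_ifs with h1 h2
    · rw [ih p (c + 1), ih p (0 + 1)]; ring
    · rw [ih 0 (c + 1), ih 0 (0 + 1)]; ring
    · exact ih (p + g) c

-- A's loop in terms of the event count
theorem solutionLoop_eq (gs : List Int) (temp : List Int) (total : Int) :
    solutionLoop gs temp total =
      total + temp.sum + gs.sum - 10 * cntLoop gs temp.sum 0 := by
  induction gs generalizing temp total with
  | nil => simp [solutionLoop, cntLoop]
  | cons g gs ih =>
    simp only [solutionLoop, cntLoop, List.sum_append, List.sum_cons,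
      List.sum_nil, add_zero]
    split_ifs with h1 h2 h3 <;>
      first
        | omega
        | (rw [ih]
           try simp only [List.sum_nil, List.sum_append, List.sum_cons, add_zero, zero_add]
           try rw [cntLoop_shift gs 0 1]
           try rw [cntLoop_shift gs temp.sum 1]
           ring)

-- 'continue the current group with acc p, then count the remaining groups'
def grpFrom (l : List Int) (p : Int) : Int :=
  let pr := innerB l p
  (if pr.1 ≥ 50 then 1 else 0) + groupsB pr.2

theorem innerB_stop (l : List Int) (a : Int) (h : ¬ a < 50) : innerB l a = (a, l) := by
  cases l with
  | nil => simp [innerB]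
  | cons g gs => simp [innerB, h]

theorem filter_small_cons_lt (g : Int) (gs : List Int) (hg : g < 50) :
    (g :: gs).filter (fun x => decide (x < 50)) = g :: gs.filter (fun x => decide (x < 50)) := by
  simp [hg]

theorem filter_small_cons_ge (g : Int) (gs : List Int) (hg : ¬ g < 50) :
    (g :: gs).filter (fun x => decide (x < 50)) = gs.filter (fun x => decide (x < 50)) := by
  simp [hg]

theorem filter_big_cons_lt (g : Int) (gs : List Int) (hg : g < 50) :
    (g :: gs).filter (fun x => decide (¬ x < 50)) = gs.filter (fun x => decide (¬ x < 50)) := by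
  simp [List.filter_cons, hg]

theorem filter_big_cons_ge (g : Int) (gs : List Int) (hg : ¬ g < 50) :
    (g :: gs).filter (fun x => decide (¬ x < 50)) = g :: gs.filter (fun x => decide (¬ x < 50)) := by
  simp [List.filter_cons, hg]

theorem grpFrom_zero (l : List Int) : grpFrom l 0 = groupsB l := by
  cases l with
  | nil => simp [grpFrom, innerB, groupsB.eq_1]
  | cons g gs =>
    rw [groupsB.eq_2]
    simp [grpFrom, innerB]

-- the single-pass count splits into big items plus small-item groups
theorem cntLoop_split (l : List Int) (p : Int) (hp : p < 50) :
    cntLoop l p 0 =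
      ((l.filter (fun g => decide (¬ g < 50))).length : Int) +
        grpFrom (l.filter (fun g => decide (g < 50))) p := by
  induction l generalizing p with
  | nil =>
    simp only [cntLoop, List.filter_nil, grpFrom, innerB, List.length_nil, groupsB.eq_1]
    rw [if_neg (by omega)]
    simp
  | cons g gs ih =>
    by_cases hg : g < 50
    · rw [filter_small_cons_lt g gs hg, filter_big_cons_lt g gs hg]
      simp only [cntLoop, if_neg (not_le.mpr hg)]
      by_cases h2 : p + g ≥ 50
      · rw [if_pos h2, cntLoop_shift gs 0 (0 + 1), ih 0 (by norm_num)]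
        have hgr : grpFrom (g :: gs.filter (fun g => decide (g < 50))) p
            = 1 + groupsB (gs.filter (fun g => decide (g < 50))) := by
          simp only [grpFrom, innerB, if_pos hp]
          rw [innerB_stop _ _ (by omega)]
          simp [h2]
        rw [hgr, grpFrom_zero]; ring
      · rw [if_neg h2, ih (p + g) (by omega)]
        have hgr : grpFrom (g :: gs.filter (fun g => decide (g < 50))) p
            = grpFrom (gs.filter (fun g => decide (g < 50))) (p + g) := by
          simp only [grpFrom, innerB, if_pos hp]
        rw [hgr]
    · rw [filter_small_cons_ge g gs hg, filter_big_cons_ge g gs hg]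
      simp only [cntLoop, if_pos (not_lt.mp hg), List.length_cons]
      rw [cntLoop_shift gs p (0 + 1), ih p hp]
      push_cast
      ring

-- big-item count = total length minus small-item count
theorem filter_not_length (l : List Int) :
    ((l.filter (fun g => decide (¬ g < 50))).length : Int)
      = (l.length : Int) - ((l.filter (fun g => decide (g < 50))).length : Int) := by
  induction l with
  | nil => simp
  | cons g gs ih =>
    by_cases hg : g < 50
    · rw [filter_small_cons_lt g gs hg, filter_big_cons_lt g gs hg]
      simp only [List.length_cons]
      push_cast
      omega
    · rw [filter_small_cons_ge g gs hg, filter_big_cons_ge g gs hg]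
      simp only [List.length_cons]
      push_cast
      omega

-- ===== VERDICT (by name: the statement is the Claim_ definition above) =====
theorem solution_spec : Claim_equal_solution := by
  intro goods _
  show solution goods = solution_alt goods
  rw [solution, solution_alt, solutionLoop_eq]
  simp only [List.sum_nil, add_zero, zero_add]
  rw [cntLoop_split goods 0 (by norm_num), grpFrom_zero, filter_not_length]
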